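-- pv_equiv track=rewrite | github.com/silva2kand/baba-coode | baba_desktop.py | build_email_analysis
-- ===== SOURCE A (Python) =====
-- def build_email_analysis(text: str) -> str:
--     lines = [line.strip() for line in text.splitlines() if line.strip()]
--     headers = {}
--     for prefix in ["subject:", "from:", "to:", "date:", "cc:"]:
--         match = next((line for line in lines if line.lower().startswith(prefix)), None)
--         if match:
--             headers[prefix[:-1].title()] = match.split(":", 1)[1].strip()
--     body_lines = [line for line in lines if ":" not in line[:20]]
--     action_lines = [
--         line for line in body_lines
--         if any(keyword in line.lower() for keyword in ["please", "can you", "deadline", "due", "action", "follow up", "meeting", "tomorrow", "asap"])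
--     ]
--     summary_lines = []
--     summary_lines.extend(f"{key}: {value}" for key, value in headers.items())
--     summary_lines.append(f"Body lines: {len(body_lines)}")
--     summary_lines.append("Likely action items:")
--     summary_lines.extend(f"- {line}" for line in (action_lines[:6] or body_lines[:4]))
--     return "\n".join(summary_lines)
-- ===== SOURCE B (Python) =====
-- PREFIXES = ["subject:", "from:", "to:", "date:", "cc:"]
-- KEYWORDS = ["please", "can you", "deadline", "due", "action", "follow up", "meeting", "tomorrow", "asap"]
--
--
-- def build_email_analysis(text: str) -> str:
--     # One pass over the raw lines: record the first value seen for each header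
--     # prefix in a temp dict and collect the body lines at the same time.
--     found = {}
--     body_lines = []
--     for raw in text.splitlines():
--         line = raw.strip()
--         if not line:
--             continue
--         low = line.lower()
--         for p in PREFIXES:
--             if p not in found and low.startswith(p):
--                 found[p] = line.split(":", 1)[1].strip()
--         if ":" not in line[:20]:
--             body_lines.append(line)
--     out = []
--     for p in PREFIXES:
--         v = found.get(p)
--         if v is not None:
--             out.append(p[:-1].title() + ": " + v)
--     out.append("Body lines: " + str(len(body_lines)))
--     out.append("Likely action items:")
--     action_lines = [l for l in body_lines if any(k in l.lower() for k in KEYWORDS)]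
--     for l in (action_lines[:6] or body_lines[:4]):
--         out.append("- " + l)
--     return "\n".join(out)
-- ===== Notes on version B (the rewrite author's own statement) =====
-- stated objective: alternative
-- what changed: B replaces A's five separate scans of the line list (one next(...) per header prefix) plus a separate body-filter pass with a single pass over the raw lines that records the first match per prefix in a temp dict and collects body lines simultaneously, emitting headers afterwards in the fixed prefix order.
import Mathlib
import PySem

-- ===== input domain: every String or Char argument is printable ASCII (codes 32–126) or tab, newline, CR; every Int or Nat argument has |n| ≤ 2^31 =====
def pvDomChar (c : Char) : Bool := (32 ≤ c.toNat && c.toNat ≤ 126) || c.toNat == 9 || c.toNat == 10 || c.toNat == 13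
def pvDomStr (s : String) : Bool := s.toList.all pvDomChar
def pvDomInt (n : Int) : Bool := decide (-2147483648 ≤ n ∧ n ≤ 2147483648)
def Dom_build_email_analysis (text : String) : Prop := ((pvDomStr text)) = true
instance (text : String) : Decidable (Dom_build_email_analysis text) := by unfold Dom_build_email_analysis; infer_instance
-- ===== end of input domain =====

-- B re-implements A's five separate scans (one per header prefix) plus a separate body
-- filter as ONE pass over the raw lines with a temp dict; return values are proved equal.

-- hand port of Python's str.title() (no PySem primitive); exact on the ASCII domain,
-- where a character is "cased" iff it is a letter
def pvTitleChars : Bool → List Char → List Char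
  | _, [] => []
  | prevCased, c :: cs =>
      (if prevCased then PySem.Chars.lowerChar c else PySem.Chars.upperChar c)
        :: pvTitleChars (PySem.Chars.isalpha c) cs

def pvTitle (s : String) : String := String.ofList (pvTitleChars false s.toList)

-- ===== PORT A =====
-- literal transliteration of A: five find-first scans of `lines`, one per prefix, into a
-- dict; then two filter passes; `m.split(":", 1)` always has a second part because the
-- matched line contains ':' (splitMax?'s none is unreachable: the separator is nonempty)
def build_email_analysis (text : String) : String :=
  let lines := ((PySem.Str.splitlines text).filter
      (fun line => !(PySem.Str.strip line == ""))).map (fun line => PySem.Str.strip line)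
  let headers : PySem.Dict String String :=
    (["subject:", "from:", "to:", "date:", "cc:"] : List String).foldl (fun headers prefx =>
      match lines.find? (fun line => PySem.Str.startswith (PySem.Str.lower line) prefx) with
      | some m => headers.insert (pvTitle (PySem.Str.slice prefx none (some (-1))))
          (PySem.Str.strip (PySem.List.pyGetD ((PySem.Str.splitMax? m ":" 1).getD []) 1 ""))
      | none => headers) PySem.Dict.empty
  let body_lines := lines.filter
      (fun line => !(PySem.Str.isIn ":" (PySem.Str.slice line none (some 20))))
  let action_lines := body_lines.filter (fun line =>
      (["please", "can you", "deadline", "due", "action", "follow up", "meeting", "tomorrow", "asap"] : List String).any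
        (fun keyword => PySem.Str.isIn keyword (PySem.Str.lower line)))
  let summary_lines := headers.items.map (fun kv => kv.1 ++ ": " ++ kv.2)
  let summary_lines := summary_lines ++ ["Body lines: " ++ PySem.Int.toStr (body_lines.length : Int)]
  let summary_lines := summary_lines ++ ["Likely action items:"]
  -- `action_lines[:6] or body_lines[:4]`: Python `or` picks the first truthy (non-empty) list
  let chosen := if PySem.List.slice action_lines none (some 6) = ([] : List String)
      then PySem.List.slice body_lines none (some 4)
      else PySem.List.slice action_lines none (some 6)
  PySem.Str.join "\n" (summary_lines ++ chosen.map (fun line => "- " ++ line))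

-- ===== PORT B =====
def pvPrefixesB : List String := ["subject:", "from:", "to:", "date:", "cc:"]

def pvKeywordsB : List String :=
  ["please", "can you", "deadline", "due", "action", "follow up", "meeting", "tomorrow", "asap"]

-- body of B's single pass: strip the raw line, skip it if empty, record a first header
-- match in the temp dict and append to the body lines (split's none is unreachable:
-- the matched line contains ':' and the separator is nonempty)
def pvLineStepB (st : PySem.Dict String String × List String) (raw : String) :
    PySem.Dict String String × List String :=
  let line := PySem.Str.strip raw
  if line == "" then st
  else
    let low := PySem.Str.lower line
    let found := pvPrefixesB.foldl (fun found p =>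
        if !(found.contains p) && PySem.Str.startswith low p then
          found.insert p
            (PySem.Str.strip (PySem.List.pyGetD ((PySem.Str.splitMax? line ":" 1).getD []) 1 ""))
        else found) st.1
    let body := if !(PySem.Str.isIn ":" (PySem.Str.slice line none (some 20)))
        then st.2 ++ [line] else st.2
    (found, body)

-- literal transliteration of B (from Source B): one pass, then headers emitted in prefix order
def build_email_analysis_alt (text : String) : String :=
  let st := (PySem.Str.splitlines text).foldl pvLineStepB
      ((PySem.Dict.empty : PySem.Dict String String), ([] : List String))
  let out := pvPrefixesB.foldl (fun out p =>
      match st.1.get? p with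
      | some v => out ++ [pvTitle (PySem.Str.slice p none (some (-1))) ++ ": " ++ v]
      | none => out) ([] : List String)
  let out := out ++ ["Body lines: " ++ PySem.Int.toStr (st.2.length : Int)]
  let out := out ++ ["Likely action items:"]
  let action_lines := st.2.filter (fun line =>
      pvKeywordsB.any (fun keyword => PySem.Str.isIn keyword (PySem.Str.lower line)))
  let chosen := if PySem.List.slice action_lines none (some 6) = ([] : List String)
      then PySem.List.slice st.2 none (some 4)
      else PySem.List.slice action_lines none (some 6)
  PySem.Str.join "\n" (out ++ chosen.map (fun line => "- " ++ line))

-- ===== PRECONDITION & SPEC =====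
def Spec_build_email_analysis (text : String) (out : String) : Prop := out = build_email_analysis_alt text
instance (text : String) (out : String) : Decidable (Spec_build_email_analysis text out) := by unfold Spec_build_email_analysis; infer_instance

-- ===== CLAIM (what is proved, stated in full; the proofs are below) =====
def Claim_equal_build_email_analysis : Prop := ∀ (text : String), Dom_build_email_analysis text → Spec_build_email_analysis text (build_email_analysis text)

-- ===== LEMMAS AND PROOFS =====

-- abbreviations for the two inner loops of B's pass (proof-side names only)
def pvHdrB (d : PySem.Dict String String) (line : String) : PySem.Dict String String :=
  pvPrefixesB.foldl (fun found p =>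
      if !(found.contains p) && PySem.Str.startswith (PySem.Str.lower line) p then
        found.insert p
          (PySem.Str.strip (PySem.List.pyGetD ((PySem.Str.splitMax? line ":" 1).getD []) 1 ""))
      else found) d

def pvVal (line : String) : String :=
  PySem.Str.strip (PySem.List.pyGetD ((PySem.Str.splitMax? line ":" 1).getD []) 1 "")

def pvIsBody (line : String) : Bool :=
  !(PySem.Str.isIn ":" (PySem.Str.slice line none (some 20)))

-- B's pass over the raw lines is the same fold over A's cleaned `lines` list
theorem pvFoldStep (ls : List String) (st : PySem.Dict String String × List String) :
    ls.foldl pvLineStepB st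
      = (((ls.filter (fun line => !(PySem.Str.strip line == ""))).map
          (fun line => PySem.Str.strip line)).foldl
            (fun st line => (pvHdrB st.1 line,
              if pvIsBody line then st.2 ++ [line] else st.2)) st) := by
  induction ls generalizing st with
  | nil => rfl
  | cons l ls ih =>
      cases hs : (PySem.Str.strip l == "") with
      | true =>
          have hstep : pvLineStepB st l = st := by simp [pvLineStepB, hs]
          simp only [List.foldl_cons, List.filter_cons, hs, Bool.not_true, if_neg,
            Bool.false_eq_true, not_false_eq_true, hstep]
          exact ih st
      | false =>
          have hstep : pvLineStepB st l
              = (pvHdrB st.1 (PySem.Str.strip l),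
                  if pvIsBody (PySem.Str.strip l) then st.2 ++ [PySem.Str.strip l] else st.2) := by
            simp [pvLineStepB, hs, pvHdrB, pvIsBody]
          simp only [List.foldl_cons, List.filter_cons, hs, Bool.not_false, if_pos, List.map_cons,
            hstep]
          exact ih _

-- the pair fold splits into its two independent accumulators
theorem pvFoldSplit (ls : List String) (d : PySem.Dict String String) (bs : List String) :
    ls.foldl (fun st line => (pvHdrB st.1 line,
        if pvIsBody line then st.2 ++ [line] else st.2)) (d, bs)
      = (ls.foldl pvHdrB d, bs ++ ls.filter (fun line => pvIsBody line)) := by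
  induction ls generalizing d bs with
  | nil => simp
  | cons l ls ih =>
      simp only [List.foldl_cons, List.filter_cons]
      rw [ih]
      cases hb : pvIsBody l <;> simp [List.append_assoc]

theorem pvStepNe (d : PySem.Dict String String) (q p : String) (v : String) (c : Bool)
    (h : p ≠ q) :
    (if !(d.contains q) && c then d.insert q v else d).get? p = d.get? p := by
  split
  · rw [PySem.Dict.get?_insert_of_ne]; exact h
  · rfl

theorem pvStepSelf (d : PySem.Dict String String) (p : String) (v : String) (c : Bool) :
    (if !(d.contains p) && c then d.insert p v else d).get? p
      = (d.get? p).or (if c then some v else none) := by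
  rw [PySem.Dict.contains_eq_isSome_get?]
  cases hg : d.get? p <;> cases c <;>
    simp [hg, PySem.Dict.get?_insert_self]

theorem pvHdrLine (d : PySem.Dict String String) (line p : String)
    (hp : p ∈ pvPrefixesB) :
    (pvHdrB d line).get? p
      = (d.get? p).or (if PySem.Str.startswith (PySem.Str.lower line) p
          then some (pvVal line) else none) := by
  simp only [pvPrefixesB, List.mem_cons, List.not_mem_nil, or_false] at hp
  simp only [pvHdrB, pvVal, pvPrefixesB, List.foldl_cons, List.foldl_nil]
  rcases hp with rfl | rfl | rfl | rfl | rfl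
  · rw [pvStepNe _ _ _ _ _ (by decide), pvStepNe _ _ _ _ _ (by decide),
      pvStepNe _ _ _ _ _ (by decide), pvStepNe _ _ _ _ _ (by decide), pvStepSelf]
  · rw [pvStepNe _ _ _ _ _ (by decide), pvStepNe _ _ _ _ _ (by decide),
      pvStepNe _ _ _ _ _ (by decide), pvStepSelf, pvStepNe _ _ _ _ _ (by decide)]
  · rw [pvStepNe _ _ _ _ _ (by decide), pvStepNe _ _ _ _ _ (by decide), pvStepSelf,
      pvStepNe _ _ _ _ _ (by decide), pvStepNe _ _ _ _ _ (by decide)]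
  · rw [pvStepNe _ _ _ _ _ (by decide), pvStepSelf, pvStepNe _ _ _ _ _ (by decide),
      pvStepNe _ _ _ _ _ (by decide), pvStepNe _ _ _ _ _ (by decide)]
  · rw [pvStepSelf, pvStepNe _ _ _ _ _ (by decide), pvStepNe _ _ _ _ _ (by decide),
      pvStepNe _ _ _ _ _ (by decide), pvStepNe _ _ _ _ _ (by decide)]

-- the dict built by B's single pass answers each prefix with the first matching line's value
theorem pvHdrFold (ls : List String) (d : PySem.Dict String String) (p : String)
    (hp : p ∈ pvPrefixesB) :
    (ls.foldl pvHdrB d).get? p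
      = (d.get? p).or
          ((ls.find? (fun line => PySem.Str.startswith (PySem.Str.lower line) p)).map pvVal) := by
  induction ls generalizing d with
  | nil => simp
  | cons l ls ih =>
      simp only [List.foldl_cons]
      rw [ih, pvHdrLine _ _ _ hp]
      cases hc : PySem.Chars.startswith (PySem.Chars.lower l.toList) p.toList <;>
        cases hg : d.get? p <;> simp [List.find?_cons, hc]


theorem pvVal_def (line : String) :
    PySem.Str.strip (PySem.List.pyGetD ((PySem.Str.splitMax? line ":" 1).getD []) 1 "")
      = pvVal line := rfl

theorem pvIsBody_def (line : String) :
    (!(PySem.Str.isIn ":" (PySem.Str.slice line none (some 20)))) = pvIsBody line := rfl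

-- emitting into a non-empty accumulator just prepends it
theorem pvEmitShift (prefs : List String) (F : String → Option String) (out : List String) :
    prefs.foldl (fun out p => match Option.map pvVal (F p) with
        | some v => out ++ [pvTitle (PySem.Str.slice p none (some (-1))) ++ ": " ++ v]
        | none => out) out
      = out ++ prefs.foldl (fun out p => match Option.map pvVal (F p) with
        | some v => out ++ [pvTitle (PySem.Str.slice p none (some (-1))) ++ ": " ++ v]
        | none => out) [] := by
  induction prefs generalizing out with
  | nil => simp
  | cons p ps ih =>
      simp only [List.foldl_cons]
      cases hF : Option.map pvVal (F p) with
      | none => simp only [hF]; exact ih out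
      | some v =>
          simp only [hF, List.nil_append]
          rw [ih (out ++ [pvTitle (PySem.Str.slice p none (some (-1))) ++ ": " ++ v]),
            ih ([pvTitle (PySem.Str.slice p none (some (-1))) ++ ": " ++ v])]
          simp [List.append_assoc]

-- A's conditional-insert loop over fresh distinct keys, read out as items, is exactly
-- B's ordered emission loop
theorem pvHdrAB (prefs : List String) (F : String → Option String)
    (d : PySem.Dict String String)
    (hfresh : ∀ p ∈ prefs, d.contains (pvTitle (PySem.Str.slice p none (some (-1)))) = false)
    (hnodup : (prefs.map (fun p => pvTitle (PySem.Str.slice p none (some (-1))))).Nodup) :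
    (prefs.foldl (fun headers prefx => match F prefx with
        | some m => headers.insert (pvTitle (PySem.Str.slice prefx none (some (-1)))) (pvVal m)
        | none => headers) d).items.map (fun kv => kv.1 ++ ": " ++ kv.2)
      = d.items.map (fun kv => kv.1 ++ ": " ++ kv.2)
        ++ prefs.foldl (fun out p => match Option.map pvVal (F p) with
            | some v => out ++ [pvTitle (PySem.Str.slice p none (some (-1))) ++ ": " ++ v]
            | none => out) [] := by
  induction prefs generalizing d with
  | nil => simp
  | cons p ps ih =>
      simp only [List.foldl_cons, List.map_cons, List.nodup_cons] at *
      cases hF : F p with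
      | none =>
          simp only [hF, Option.map_none]
          rw [ih d (fun q hq => hfresh q (List.mem_cons_of_mem _ hq)) hnodup.2]
      | some m =>
          simp only [hF, Option.map_some, List.nil_append]
          rw [ih (d.insert (pvTitle (PySem.Str.slice p none (some (-1)))) (pvVal m))
                (fun q hq => by
                  rw [PySem.Dict.contains_insert]
                  have hne : pvTitle (PySem.Str.slice q none (some (-1)))
                      ≠ pvTitle (PySem.Str.slice p none (some (-1))) := by
                    intro he
                    exact hnodup.1 (he ▸ List.mem_map_of_mem hq)
                  simp [hne, hfresh q (List.mem_cons_of_mem _ hq)])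
                hnodup.2]
          rw [PySem.Dict.items_insert_of_not_contains _ _ (hfresh p (List.mem_cons_self))]
          rw [pvEmitShift ps F
            ([pvTitle (PySem.Str.slice p none (some (-1))) ++ ": " ++ pvVal m])]
          simp [List.append_assoc]

-- ===== VERDICT (by name: the statement is the Claim_ definition above) =====
set_option maxHeartbeats 1000000 in
theorem build_email_analysis_spec : Claim_equal_build_email_analysis := by
  intro text _
  unfold Spec_build_email_analysis
  simp only [build_email_analysis, build_email_analysis_alt]
  rw [pvFoldStep, pvFoldSplit]
  dsimp only
  generalize ((PySem.Str.splitlines text).filter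
      (fun line => !(PySem.Str.strip line == ""))).map (fun line => PySem.Str.strip line) = L
  simp only [pvVal_def, pvIsBody_def, pvKeywordsB, List.nil_append]
  rw [PySem.List.foldl_congr_mem pvPrefixesB _
      (fun out p => match Option.map pvVal
          (L.find? (fun line => PySem.Str.startswith (PySem.Str.lower line) p)) with
        | some v => out ++ [pvTitle (PySem.Str.slice p none (some (-1))) ++ ": " ++ v]
        | none => out) []
      (by
        intro acc p hp
        rw [pvHdrFold L PySem.Dict.empty p hp]
        simp [PySem.Dict.get?_empty, Option.none_or])]
  rw [show pvPrefixesB = ["subject:", "from:", "to:", "date:", "cc:"] from rfl]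
  rw [pvHdrAB (["subject:", "from:", "to:", "date:", "cc:"] : List String)
      (fun prefx => L.find? (fun line => PySem.Str.startswith (PySem.Str.lower line) prefx))
      PySem.Dict.empty
      (fun p _ => PySem.Dict.contains_empty _)
      (by decide)]
  simp only [show (PySem.Dict.empty : PySem.Dict String String).items = [] from rfl,
    List.map_nil, List.nil_append]
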